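-- pv_equiv track=rewrite | github.com/halpernmoshe/biostimulant-fingerprinting | score_PSK.py | mk_samps
-- ===== SOURCE A (Python) =====
-- def mk_samps(rows, idx):
--     s=[{} for _ in idx]
--     for row in rows[1:]:
--         g=row[0]
--         if not g or not str(g).startswith("AT"): continue
--         g=str(g).strip()
--         for k,ci in enumerate(idx):
--             v=row[ci] if ci<len(row) else None
--             s[k][g]=int(v) if v is not None else 0
--     return s
-- ===== SOURCE B (Python) =====
-- def mk_samps(rows, idx):
--     # Build a gene -> row index once (dict semantics: last row wins, first-occurrence
--     # order kept), so prefix filtering and duplicate resolution disappear from the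
--     # per-column phase, which then only extracts values for distinct genes.
--     genes = {}
--     for row in rows[1:]:
--         g = row[0]
--         if g and str(g).startswith("AT"):
--             genes[str(g).strip()] = row
--     return [{g: (int(row[ci]) if ci < len(row) and row[ci] is not None else 0)
--              for g, row in genes.items()}
--             for ci in idx]
-- ===== Notes on version B (the rewrite author's own statement) =====
-- stated objective: alternative
-- what changed: Replaces A's interleaved row-major pass that mutates every per-index dict for each row with a gene->row index dict built once (last row wins, dict order), after which each per-index dict is produced from the index's distinct genes with no filtering or duplicate resolution left in that phase.
import Mathlib
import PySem

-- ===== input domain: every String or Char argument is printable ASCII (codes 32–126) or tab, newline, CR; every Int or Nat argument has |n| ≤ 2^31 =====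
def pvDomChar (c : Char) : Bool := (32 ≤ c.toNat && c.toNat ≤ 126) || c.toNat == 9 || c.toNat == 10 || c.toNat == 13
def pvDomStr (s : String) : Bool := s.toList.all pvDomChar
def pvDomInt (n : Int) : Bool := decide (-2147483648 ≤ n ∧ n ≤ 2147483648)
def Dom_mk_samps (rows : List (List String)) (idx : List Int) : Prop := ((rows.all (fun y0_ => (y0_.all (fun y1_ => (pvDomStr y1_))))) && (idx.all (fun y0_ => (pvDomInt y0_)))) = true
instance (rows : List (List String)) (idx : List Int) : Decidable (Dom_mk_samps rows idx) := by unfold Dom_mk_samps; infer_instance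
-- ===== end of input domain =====

-- B replaces A's interleaved row-major pass over all per-index dicts with a gene→row
-- index dict built once (last row wins, dict order), from which each per-index dict is
-- then produced over distinct genes; objective: alternative decomposition, same cost.

-- ===== PORT A =====
-- literal port of A: s = [{} for _ in idx]; for row in rows[1:]: …; nested enumerate(idx)
-- loop mutating s[k]. row[0] / row[ci] / int(v) are totalized with .getD — Pre_ excludes
-- exactly the inputs where the Python raises there.
def mk_samps (rows : List (List String)) (idx : List Int) : List (List (String × Int)) :=
  let s0 : List (PySem.Dict String Int) := idx.map (fun _ => PySem.Dict.empty)
  let s := (PySem.List.slice rows (some 1) none).foldl (fun s row =>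
    let g := (PySem.List.pyGet? row 0).getD ""          -- row[0]; Pre_ excludes row = []
    if g = "" ∨ PySem.Str.startswith g "AT" = false then s
    else
      let g := PySem.Str.strip g
      (PySem.List.enumerate idx).foldl (fun s kci =>
        let k := kci.1
        let ci := kci.2
        let v : Option String :=
          if ci < (row.length : Int) then PySem.List.pyGet? row ci else none
        let x : Int :=
          match v with
          | some t => (PySem.Int.ofStr? t).getD 0       -- int(v); Pre_ excludes ValueError/IndexError
          | none => 0
        PySem.List.pySetD s k
          (PySem.Dict.insert (PySem.List.pyGetD s k PySem.Dict.empty) g x)) s) s0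
  s.map (fun d => d.items)

-- ===== PORT B =====
-- literal port of Source B: one pass building the gene→row index dict 'genes', then a
-- per-index dict-comprehension over genes.items(). Cells are List String here, so
-- Source B's 'row[ci] is not None' guard is identically true and is omitted.
def mk_samps_alt (rows : List (List String)) (idx : List Int) : List (List (String × Int)) :=
  let genes : PySem.Dict String (List String) :=
    (PySem.List.slice rows (some 1) none).foldl (fun d row =>
      let g := (PySem.List.pyGet? row 0).getD ""
      if g ≠ "" ∧ PySem.Str.startswith g "AT" = true then
        PySem.Dict.insert d (PySem.Str.strip g) row
      else d) PySem.Dict.empty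
  idx.map (fun ci =>
    (genes.items.foldl (fun d gr =>
      PySem.Dict.insert d gr.1
        (if ci < (gr.2.length : Int) then
          ((PySem.List.pyGet? gr.2 ci).bind PySem.Int.ofStr?).getD 0
        else 0)) PySem.Dict.empty).items)

-- ===== PRECONDITION & SPEC =====
-- Pre_ = exactly the inputs where Python A returns normally: every data row is nonempty
-- (row[0] would raise IndexError), and for every kept row and every probed index ci
-- (ci < len(row)) the index is in Python's negative-wrap range and the cell parses as int.
def Pre_mk_samps (rows : List (List String)) (idx : List Int) : Prop :=
  ((rows.drop 1).all (fun row =>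
    !row.isEmpty &&
    (!((row.headD "" != "") && PySem.Str.startswith (row.headD "") "AT") ||
      idx.all (fun ci =>
        !(decide (ci < (row.length : Int))) ||
          (decide (-(row.length : Int) ≤ ci) &&
            ((PySem.List.pyGet? row ci).bind PySem.Int.ofStr?).isSome))))) = true
instance (rows : List (List String)) (idx : List Int) : Decidable (Pre_mk_samps rows idx) := by unfold Pre_mk_samps; infer_instance

def pvWitness_mk_samps : List (List String) × List Int := ([["hdr"], ["AT1 ", "5"]], [1])

def Spec_mk_samps (rows : List (List String)) (idx : List Int) (out : List (List (String × Int))) : Prop := out = mk_samps_alt rows idx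
instance (rows : List (List String)) (idx : List Int) (out : List (List (String × Int))) : Decidable (Spec_mk_samps rows idx out) := by unfold Spec_mk_samps; infer_instance

-- ===== CLAIM (what is proved, stated in full; the proofs are below) =====
def Claim_equal_mk_samps : Prop := ∀ (rows : List (List String)) (idx : List Int), Dom_mk_samps rows idx → Pre_mk_samps rows idx → Spec_mk_samps rows idx (mk_samps rows idx)

-- ===== LEMMAS AND PROOFS =====

-- the per-cell value both programs compute (B's expression, verbatim)
def pvVal (row : List String) (ci : Int) : Int :=
  if ci < (row.length : Int) then ((PySem.List.pyGet? row ci).bind PySem.Int.ofStr?).getD 0 else 0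

-- A's value expression (an Option match) equals pvVal
lemma pvValA_eq (row : List String) (ci : Int) :
    (match (if ci < (row.length : Int) then PySem.List.pyGet? row ci else none : Option String) with
      | some t => (PySem.Int.ofStr? t).getD 0
      | none => 0) = pvVal row ci := by
  unfold pvVal
  split_ifs with h
  · cases hg : PySem.List.pyGet? row ci <;> simp
  · rfl

-- the inner enumerate-fold of A sets each slot exactly once: folding over enumerate
-- starting at |pre| on pre ++ s is pre ++ a pointwise insert over s (s in step with idx)
lemma inner_fold (g : String) (row : List String) :
    ∀ (idx : List Int) (pre s : List (PySem.Dict String Int)), s.length = idx.length →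
      (PySem.List.enumerate idx (pre.length : Int)).foldl (fun s kci =>
        PySem.List.pySetD s kci.1
          (PySem.Dict.insert (PySem.List.pyGetD s kci.1 PySem.Dict.empty) g
            (pvVal row kci.2))) (pre ++ s)
      = pre ++ List.zipWith (fun d ci => PySem.Dict.insert d g (pvVal row ci)) s idx := by
  intro idx
  induction idx with
  | nil => intro pre s h; simp at h; simp [PySem.List.enumerate, h]
  | cons ci rest ih =>
    intro pre s h
    cases s with
    | nil => simp at h
    | cons d s' =>
      rw [PySem.List.enumerate_cons]
      simp only [List.foldl_cons]
      have hset : PySem.List.pySetD (pre ++ d :: s') ((pre.length : Nat) : Int)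
          (PySem.Dict.insert (PySem.List.pyGetD (pre ++ d :: s') ((pre.length : Nat) : Int) PySem.Dict.empty) g (pvVal row ci))
          = pre ++ (PySem.Dict.insert d g (pvVal row ci)) :: s' := by
        rw [PySem.List.pySetD_natCast, PySem.List.pyGetD_natCast]
        rw [List.getD_eq_getElem?_getD]
        simp
      rw [hset]
      have hlen : ((pre.length : Int) + 1) = (((pre ++ [PySem.Dict.insert d g (pvVal row ci)]).length : Nat) : Int) := by
        simp
      rw [hlen]
      have := ih (pre ++ [PySem.Dict.insert d g (pvVal row ci)]) s' (by simpa using h)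
      simpa using this

-- columns are independent: folding the pointwise-insert step over the rows, started on
-- idx.map acc, equals mapping (per column) the fold over the filtered rows
lemma colwise (idx : List Int) :
    ∀ (rowsr : List (List String)) (acc : Int → PySem.Dict String Int),
      rowsr.foldl (fun s row =>
        if (PySem.List.pyGet? row 0).getD "" = "" ∨ PySem.Str.startswith ((PySem.List.pyGet? row 0).getD "") "AT" = false then s
        else List.zipWith (fun d ci => PySem.Dict.insert d (PySem.Str.strip ((PySem.List.pyGet? row 0).getD "")) (pvVal row ci)) s idx)
        (idx.map acc)
      = idx.map (fun ci =>
          (rowsr.filterMap (fun row =>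
            if (PySem.List.pyGet? row 0).getD "" ≠ "" ∧ PySem.Str.startswith ((PySem.List.pyGet? row 0).getD "") "AT" = true then
              some (PySem.Str.strip ((PySem.List.pyGet? row 0).getD ""), row)
            else none)).foldl
            (fun d gr => PySem.Dict.insert d gr.1 (pvVal gr.2 ci)) (acc ci)) := by
  intro rowsr
  induction rowsr with
  | nil => intro acc; simp
  | cons row rest ih =>
    intro acc
    simp only [List.foldl_cons, List.filterMap_cons]
    by_cases h : (PySem.List.pyGet? row 0).getD "" = "" ∨ PySem.Str.startswith ((PySem.List.pyGet? row 0).getD "") "AT" = false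
    · have h' : ¬ ((PySem.List.pyGet? row 0).getD "" ≠ "" ∧ PySem.Str.startswith ((PySem.List.pyGet? row 0).getD "") "AT" = true) := by
        intro hc
        rcases h with h | h
        · exact hc.1 h
        · rw [hc.2] at h; simp at h
      rw [if_pos h, if_neg h']
      exact ih acc
    · have h' : (PySem.List.pyGet? row 0).getD "" ≠ "" ∧ PySem.Str.startswith ((PySem.List.pyGet? row 0).getD "") "AT" = true := by
        constructor
        · exact fun he => h (Or.inl he)
        · cases hb : PySem.Str.startswith ((PySem.List.pyGet? row 0).getD "") "AT"
          · exact absurd (Or.inr hb) h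
          · rfl
      rw [if_neg h, if_pos h']
      have hz : List.zipWith (fun d ci => PySem.Dict.insert d (PySem.Str.strip ((PySem.List.pyGet? row 0).getD "")) (pvVal row ci)) (idx.map acc) idx
          = idx.map (fun ci => PySem.Dict.insert (acc ci) (PySem.Str.strip ((PySem.List.pyGet? row 0).getD "")) (pvVal row ci)) := by
        rw [List.zipWith_map_left]
        exact List.zipWith_self ..
      rw [hz, ih]
      simp

-- A's outer fold with the inner loop rewritten pointwise (length invariant carried along)
lemma outer_eq (idx : List Int) :
    ∀ (rowsr : List (List String)) (s : List (PySem.Dict String Int)), s.length = idx.length →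
      rowsr.foldl (fun s row =>
        if (PySem.List.pyGet? row 0).getD "" = "" ∨ PySem.Str.startswith ((PySem.List.pyGet? row 0).getD "") "AT" = false then s
        else
          (PySem.List.enumerate idx).foldl (fun s kci =>
            PySem.List.pySetD s kci.1
              (PySem.Dict.insert (PySem.List.pyGetD s kci.1 PySem.Dict.empty)
                (PySem.Str.strip ((PySem.List.pyGet? row 0).getD "")) (pvVal row kci.2))) s) s
      = rowsr.foldl (fun s row =>
          if (PySem.List.pyGet? row 0).getD "" = "" ∨ PySem.Str.startswith ((PySem.List.pyGet? row 0).getD "") "AT" = false then s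
          else List.zipWith (fun d ci => PySem.Dict.insert d (PySem.Str.strip ((PySem.List.pyGet? row 0).getD "")) (pvVal row ci)) s idx) s := by
  intro rowsr
  induction rowsr with
  | nil => intro s h; rfl
  | cons row rest ih =>
    intro s h
    simp only [List.foldl_cons]
    by_cases hc : (PySem.List.pyGet? row 0).getD "" = "" ∨ PySem.Str.startswith ((PySem.List.pyGet? row 0).getD "") "AT" = false
    · rw [if_pos hc, if_pos hc]; exact ih s h
    · rw [if_neg hc, if_neg hc]
      have hi := inner_fold (PySem.Str.strip ((PySem.List.pyGet? row 0).getD "")) row idx [] s h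
      simp only [List.nil_append, List.length_nil, Nat.cast_zero] at hi
      rw [hi]
      exact ih _ (by rw [List.length_zipWith, h]; omega)

-- B's if-insert-else-skip fold over the rows IS a plain insert fold over the valid pairs
lemma genes_fold_eq_filter (rowsr : List (List String)) :
    rowsr.foldl (fun d row =>
      let g := (PySem.List.pyGet? row 0).getD ""
      if g ≠ "" ∧ PySem.Str.startswith g "AT" = true then
        PySem.Dict.insert d (PySem.Str.strip g) row
      else d) PySem.Dict.empty
    = (rowsr.filterMap (fun row =>
        if (PySem.List.pyGet? row 0).getD "" ≠ "" ∧ PySem.Str.startswith ((PySem.List.pyGet? row 0).getD "") "AT" = true then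
          some (PySem.Str.strip ((PySem.List.pyGet? row 0).getD ""), row)
        else none)).foldl (fun d gr => PySem.Dict.insert d gr.1 gr.2) PySem.Dict.empty := by
  generalize PySem.Dict.empty = e
  induction rowsr generalizing e with
  | nil => rfl
  | cons row rest ih =>
    simp only [List.foldl_cons, List.filterMap_cons]
    by_cases h : (PySem.List.pyGet? row 0).getD "" ≠ "" ∧ PySem.Str.startswith ((PySem.List.pyGet? row 0).getD "") "AT" = true
    · rw [if_pos h, if_pos h]; simp only [List.foldl_cons]; exact ih _
    · rw [if_neg h, if_neg h]; exact ih _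

-- inserting mapped values tracks inserting the raw values, item list for item list
lemma items_fold_map {α β : Type} (g : String → α → β) :
    ∀ (l : List (String × α)) (d : PySem.Dict String α) (d' : PySem.Dict String β),
      d'.items = d.items.map (fun p => (p.1, g p.1 p.2)) →
      (l.foldl (fun t p => PySem.Dict.insert t p.1 (g p.1 p.2)) d').items
        = (l.foldl (fun t p => PySem.Dict.insert t p.1 p.2) d).items.map (fun p => (p.1, g p.1 p.2)) := by
  intro l
  induction l with
  | nil => intro d d' h; simpa using h
  | cons p rest ih =>
    intro d d' h
    simp only [List.foldl_cons]
    apply ih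
    have hcont : d'.contains p.1 = d.contains p.1 := by
      show d'.items.any (fun q => q.1 == p.1) = d.items.any (fun q => q.1 == p.1)
      rw [h, List.any_map]; rfl
    by_cases hc : d.contains p.1 = true
    · rw [PySem.Dict.items_insert_of_contains _ _ hc,
        PySem.Dict.items_insert_of_contains _ _ (by rw [hcont]; exact hc), h]
      simp only [List.map_map]
      apply List.map_congr_left
      intro q hq
      by_cases he : q.1 = p.1 <;> simp [he]
    · rw [PySem.Dict.items_insert_of_not_contains _ _ (show d'.contains p.1 = false by rw [hcont]; simpa using hc),
        PySem.Dict.items_insert_of_not_contains _ _ (show d.contains p.1 = false by simpa using hc), h]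
      simp

-- a fresh-distinct-keys fold from empty just appends the mapped pairs
lemma bcol_items (D : PySem.Dict String (List String)) (hD : D.keys.Nodup) (ci : Int) :
    ((D.items.foldl (fun d gr =>
        PySem.Dict.insert d gr.1
          (if ci < (gr.2.length : Int) then
            ((PySem.List.pyGet? gr.2 ci).bind PySem.Int.ofStr?).getD 0
          else 0)) PySem.Dict.empty).items)
    = D.items.map (fun p => (p.1, pvVal p.2 ci)) := by
  rw [PySem.Dict.items_foldl_insert_fresh D.items Prod.fst
    (fun gr => if ci < (gr.2.length : Int) then ((PySem.List.pyGet? gr.2 ci).bind PySem.Int.ofStr?).getD 0 else 0)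
    PySem.Dict.empty (fun a _ => PySem.Dict.contains_empty a.1)
    (by simpa [PySem.Dict.keys] using hD)]
  simp [pvVal, PySem.Dict.empty]

-- the two ports agree on every input
lemma ports_eq (rows : List (List String)) (idx : List Int) :
    mk_samps rows idx = mk_samps_alt rows idx := by
  have hin : ∀ row : List String,
      (fun (s : List (PySem.Dict String Int)) (kci : Int × Int) =>
        let k := kci.1
        let ci := kci.2
        let v : Option String :=
          if ci < (row.length : Int) then PySem.List.pyGet? row ci else none
        let x : Int :=
          match v with
          | some t => (PySem.Int.ofStr? t).getD 0
          | none => 0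
        PySem.List.pySetD s k
          (PySem.Dict.insert (PySem.List.pyGetD s k PySem.Dict.empty)
            (PySem.Str.strip ((PySem.List.pyGet? row 0).getD "")) x))
      = (fun s kci =>
          PySem.List.pySetD s kci.1
            (PySem.Dict.insert (PySem.List.pyGetD s kci.1 PySem.Dict.empty)
              (PySem.Str.strip ((PySem.List.pyGet? row 0).getD "")) (pvVal row kci.2))) := by
    intro row; funext s kci; simp only [pvValA_eq]
  unfold mk_samps mk_samps_alt
  simp only [hin]
  rw [outer_eq idx _ _ (by simp), colwise idx _ (fun _ => PySem.Dict.empty),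
    genes_fold_eq_filter, List.map_map]
  apply List.map_congr_left
  intro ci _
  simp only [Function.comp]
  have hD : ((PySem.List.slice rows (some 1) none).filterMap (fun row =>
      if (PySem.List.pyGet? row 0).getD "" ≠ "" ∧ PySem.Str.startswith ((PySem.List.pyGet? row 0).getD "") "AT" = true then
        some (PySem.Str.strip ((PySem.List.pyGet? row 0).getD ""), row)
      else none)).foldl (fun d gr => PySem.Dict.insert d gr.1 gr.2) PySem.Dict.empty
      |>.keys.Nodup :=
    PySem.Dict.nodup_keys_foldl_insert_key _ Prod.fst _ _ (by simp)
  rw [items_fold_map (fun _ row => pvVal row ci) _ PySem.Dict.empty PySem.Dict.empty (by simp [PySem.Dict.empty]), bcol_items _ hD ci]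

-- ===== VERDICT (by name: the statement is the Claim_ definition above) =====
theorem mk_samps_spec : Claim_equal_mk_samps := by
  intro rows idx _ _
  unfold Spec_mk_samps
  exact ports_eq rows idx
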